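-- pv_equiv track=rewrite | github.com/rush86999/atom | backend/service_health_endpoints.py | get_service_category
-- ===== SOURCE A (Python) =====
-- def get_service_category(service_id: str) -> str:
--     """Get category for a service"""
--     categories = {
--         "productivity": ["asana", "notion", "linear", "outlook", "microsoft365"],
--         "storage": ["dropbox", "google_drive", "onedrive", "box"],
--         "communication": ["slack", "whatsapp", "zoom"],
--         "business": ["stripe", "salesforce", "tableau"],
--         "development": ["github"]
--     }
--
--     for category, services in categories.items():
--         if service_id in services:
--             return category
--
--     return "other"
-- ===== SOURCE B (Python) =====
-- _SERVICE_CATEGORY = {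
--     "asana": "productivity", "notion": "productivity", "linear": "productivity",
--     "outlook": "productivity", "microsoft365": "productivity",
--     "dropbox": "storage", "google_drive": "storage", "onedrive": "storage", "box": "storage",
--     "slack": "communication", "whatsapp": "communication", "zoom": "communication",
--     "stripe": "business", "salesforce": "business", "tableau": "business",
--     "github": "development",
-- }
--
-- def get_service_category(service_id: str) -> str:
--     """Get category for a service"""
--     return _SERVICE_CATEGORY.get(service_id, "other")
-- ===== Notes on version B (the rewrite author's own statement) =====
-- stated objective: simpler
-- what changed: Replaced the loop over category-to-service-list pairs with an inverted flat service-to-category dict built once at module level and a single dict .get with the same default; no loop or membership scan remains.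
import Mathlib
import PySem

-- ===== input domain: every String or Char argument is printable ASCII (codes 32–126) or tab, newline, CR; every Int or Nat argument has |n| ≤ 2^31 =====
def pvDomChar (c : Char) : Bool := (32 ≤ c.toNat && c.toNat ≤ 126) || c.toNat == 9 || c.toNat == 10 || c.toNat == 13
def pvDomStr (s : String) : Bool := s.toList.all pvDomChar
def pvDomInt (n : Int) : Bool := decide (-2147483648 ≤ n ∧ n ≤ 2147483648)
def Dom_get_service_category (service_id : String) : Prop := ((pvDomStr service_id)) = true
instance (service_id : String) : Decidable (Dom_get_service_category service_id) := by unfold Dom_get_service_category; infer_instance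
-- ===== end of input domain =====

-- B replaces A's loop over category→services lists with one flat service→category dict lookup (simpler).

-- ===== PORT A =====
-- the dict literal, as an insertion-ordered association list
def pvCategoriesA : List (String × List String) :=
  [("productivity", ["asana", "notion", "linear", "outlook", "microsoft365"]),
   ("storage", ["dropbox", "google_drive", "onedrive", "box"]),
   ("communication", ["slack", "whatsapp", "zoom"]),
   ("business", ["stripe", "salesforce", "tableau"]),
   ("development", ["github"])]

-- the 'for category, services in categories.items(): if service_id in services: return category' loop
def pvLoopA (service_id : String) : List (String × List String) → String
  | [] => "other"
  | (category, services) :: rest =>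
      if services.contains service_id then category else pvLoopA service_id rest

def get_service_category (service_id : String) : String :=
  pvLoopA service_id pvCategoriesA

-- ===== PORT B =====
-- the module-level flat dict _SERVICE_CATEGORY
def pvServiceCategoryB : PySem.Dict String String :=
  PySem.Dict.ofList
    [("asana", "productivity"), ("notion", "productivity"), ("linear", "productivity"),
     ("outlook", "productivity"), ("microsoft365", "productivity"),
     ("dropbox", "storage"), ("google_drive", "storage"), ("onedrive", "storage"), ("box", "storage"),
     ("slack", "communication"), ("whatsapp", "communication"), ("zoom", "communication"),
     ("stripe", "business"), ("salesforce", "business"), ("tableau", "business"),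
     ("github", "development")]

def get_service_category_alt (service_id : String) : String :=
  pvServiceCategoryB.getD service_id "other"

-- ===== PRECONDITION & SPEC =====
def Spec_get_service_category (service_id : String) (out : String) : Prop := out = get_service_category_alt service_id
instance (service_id : String) (out : String) : Decidable (Spec_get_service_category service_id out) := by unfold Spec_get_service_category; infer_instance

-- ===== CLAIM (what is proved, stated in full; the proofs are below) =====
def Claim_equal_get_service_category : Prop := ∀ (service_id : String), Dom_get_service_category service_id → Spec_get_service_category service_id (get_service_category service_id)

-- ===== LEMMAS AND PROOFS =====
theorem ports_agree (s : String) : get_service_category s = get_service_category_alt s := by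
  by_cases h1 : s = "asana"
  · subst h1; decide
  by_cases h2 : s = "notion"
  · subst h2; decide
  by_cases h3 : s = "linear"
  · subst h3; decide
  by_cases h4 : s = "outlook"
  · subst h4; decide
  by_cases h5 : s = "microsoft365"
  · subst h5; decide
  by_cases h6 : s = "dropbox"
  · subst h6; decide
  by_cases h7 : s = "google_drive"
  · subst h7; decide
  by_cases h8 : s = "onedrive"
  · subst h8; decide
  by_cases h9 : s = "box"
  · subst h9; decide
  by_cases h10 : s = "slack"
  · subst h10; decide
  by_cases h11 : s = "whatsapp"
  · subst h11; decide
  by_cases h12 : s = "zoom"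
  · subst h12; decide
  by_cases h13 : s = "stripe"
  · subst h13; decide
  by_cases h14 : s = "salesforce"
  · subst h14; decide
  by_cases h15 : s = "tableau"
  · subst h15; decide
  by_cases h16 : s = "github"
  · subst h16; decide
  have hd : get_service_category_alt s = (PySem.Dict.mk [("asana", "productivity"), ("notion", "productivity"), ("linear", "productivity"), ("outlook", "productivity"), ("microsoft365", "productivity"), ("dropbox", "storage"), ("google_drive", "storage"), ("onedrive", "storage"), ("box", "storage"), ("slack", "communication"), ("whatsapp", "communication"), ("zoom", "communication"), ("stripe", "business"), ("salesforce", "business"), ("tableau", "business"), ("github", "development")]).getD s "other" := rfl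
  rw [hd]
  unfold get_service_category pvLoopA pvCategoriesA
  simp [pvLoopA, PySem.Dict.getD, PySem.Dict.get?, beq_iff_eq, h1, h2, h3, h4, h5, h6, h7, h8, h9, h10, h11, h12, h13, h14, h15, h16, Ne.symm h1, Ne.symm h2, Ne.symm h3, Ne.symm h4, Ne.symm h5, Ne.symm h6, Ne.symm h7, Ne.symm h8, Ne.symm h9, Ne.symm h10, Ne.symm h11, Ne.symm h12, Ne.symm h13, Ne.symm h14, Ne.symm h15, Ne.symm h16]

-- ===== VERDICT (by name: the statement is the Claim_ definition above) =====
theorem get_service_category_spec : Claim_equal_get_service_category := by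
  intro s _
  unfold Spec_get_service_category
  exact ports_agree s
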